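-- pv_equiv track=rewrite | github.com/AdrienDeoux/Advent-Of-Code | Advent Of Code 2023/day1/day1.py | replace_str_in_word
-- ===== SOURCE A (Python) =====
-- def replace_str_in_word(word):
--     """
--     :param word: a string object containing at least one number
--     :return: same word but adding actual int to string number when they are spelled
--
--     :example: 'twone3four' will return '2tw1one34four'
--     """
--     new_word = ''
--     length_word = len(word)
--     i = 0
--
--     while(i < length_word):
--         idx = i
--         if word[idx:idx+3] == ('one'):
--             new_word += '1'
--         elif word[idx:idx+3] == ('two'):
--             new_word += '2'
--         elif word[idx:idx+3] == ('six'):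
--             new_word += '6'
--         elif word[idx:idx+4] == ('zero'):
--             new_word += '0'
--         elif word[idx:idx+4] == ('four'):
--             new_word += '4'
--         elif word[idx:idx+4] == ('five'):
--             new_word += '5'
--         elif word[idx:idx+4] == ('nine'):
--             new_word += '9'
--         elif word[idx:idx+5] == ('three'):
--             new_word += '3'
--         elif word[idx:idx+5] == ('seven'):
--             new_word += '7'
--         elif word[idx:idx+5] == ('eight'):
--             new_word += '8'
--         new_word += word[idx]
--         i += 1
--     return new_word
-- ===== SOURCE B (Python) =====
-- def replace_str_in_word(word):
--     # Two-phase: record every start index of a spelled-out digit with str.find,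
--     # then assemble the result in one pass over the indices.
--     ins = {}
--     for w, d in [('zero', '0'), ('one', '1'), ('two', '2'), ('three', '3'),
--                  ('four', '4'), ('five', '5'), ('six', '6'), ('seven', '7'),
--                  ('eight', '8'), ('nine', '9')]:
--         pos = 0
--         while True:
--             j = word.find(w, pos)
--             if j == -1:
--                 break
--             ins[j] = d
--             pos = j + 1
--     return ''.join(ins.get(i, '') + word[i] for i in range(len(word)))
-- ===== Notes on version B (the rewrite author's own statement) =====
-- stated objective: faster
-- what changed: A scans every index in interpreted Python and compares up to ten slices per position; B instead runs C-level str.find per spelled word to record all occurrence start indices in a dict, then assembles the output in a single join over the indices.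
import Mathlib
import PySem

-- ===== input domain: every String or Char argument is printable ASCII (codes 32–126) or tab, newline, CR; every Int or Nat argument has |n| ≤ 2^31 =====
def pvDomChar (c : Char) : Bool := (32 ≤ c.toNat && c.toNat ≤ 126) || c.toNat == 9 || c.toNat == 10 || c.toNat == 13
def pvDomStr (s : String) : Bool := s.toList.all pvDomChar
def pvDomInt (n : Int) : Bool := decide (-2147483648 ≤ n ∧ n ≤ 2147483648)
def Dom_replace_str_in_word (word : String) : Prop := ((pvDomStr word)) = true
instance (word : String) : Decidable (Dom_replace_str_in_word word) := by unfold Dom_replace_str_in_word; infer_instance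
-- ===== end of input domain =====

-- B replaces A's per-index ten-way slice cascade by a two-phase algorithm (record all
-- occurrence start indices of each spelled digit with str.find, then assemble in one pass);
-- objective: a structurally different and measurably faster implementation, same exact output.


-- ===== PORT A =====
-- A's while-loop: at each index, compare the three slices word[i:i+3] / [i:i+4] / [i:i+5]
-- against the ten spelled digits in A's order, append the digit, then always append word[i].
def replace_str_in_word_go (cs : List Char) (i : Nat) (acc : List Char) : List Char :=
  if h : i < cs.length then
    let acc' :=
      if PySem.List.slice cs (some (i:Int)) (some ((i:Int)+3)) = "one".toList then acc ++ "1".toList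
      else if PySem.List.slice cs (some (i:Int)) (some ((i:Int)+3)) = "two".toList then acc ++ "2".toList
      else if PySem.List.slice cs (some (i:Int)) (some ((i:Int)+3)) = "six".toList then acc ++ "6".toList
      else if PySem.List.slice cs (some (i:Int)) (some ((i:Int)+4)) = "zero".toList then acc ++ "0".toList
      else if PySem.List.slice cs (some (i:Int)) (some ((i:Int)+4)) = "four".toList then acc ++ "4".toList
      else if PySem.List.slice cs (some (i:Int)) (some ((i:Int)+4)) = "five".toList then acc ++ "5".toList
      else if PySem.List.slice cs (some (i:Int)) (some ((i:Int)+4)) = "nine".toList then acc ++ "9".toList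
      else if PySem.List.slice cs (some (i:Int)) (some ((i:Int)+5)) = "three".toList then acc ++ "3".toList
      else if PySem.List.slice cs (some (i:Int)) (some ((i:Int)+5)) = "seven".toList then acc ++ "7".toList
      else if PySem.List.slice cs (some (i:Int)) (some ((i:Int)+5)) = "eight".toList then acc ++ "8".toList
      else acc
    replace_str_in_word_go cs (i+1) (acc' ++ [cs[i]])
  else acc
termination_by cs.length - i
decreasing_by omega

def replace_str_in_word (word : String) : String :=
  String.mk (replace_str_in_word_go word.toList 0 [])

-- ===== PORT B =====
-- Source B's table of (spelled word, digit) pairs, in Source B's order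
def pvTable : List (List Char × List Char) :=
  [("zero".toList, "0".toList), ("one".toList, "1".toList), ("two".toList, "2".toList),
   ("three".toList, "3".toList), ("four".toList, "4".toList), ("five".toList, "5".toList),
   ("six".toList, "6".toList), ("seven".toList, "7".toList), ("eight".toList, "8".toList),
   ("nine".toList, "9".toList)]

-- Source B's 'while True: j = word.find(w, pos); …; ins[j] = d; pos = j + 1' loop.
-- fuel only guards totality: pos strictly increases and find fails once pos > len,
-- so cs.length + 1 steps always suffice.
def pvFindLoop (fuel : Nat) (cs w d : List Char) (pos : Nat)
    (ins : PySem.Dict Int (List Char)) : PySem.Dict Int (List Char) :=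
  match fuel with
  | 0 => ins
  | fuel + 1 =>
    let j := PySem.Chars.findFrom cs w (pos : Int) none
    if j = -1 then ins
    else pvFindLoop fuel cs w d (j.toNat + 1) (ins.insert j d)

def replace_str_in_word_alt (word : String) : String :=
  let cs := word.toList
  let ins := pvTable.foldl (fun ins wd => pvFindLoop (cs.length + 1) cs wd.1 wd.2 0 ins)
    PySem.Dict.empty
  -- ''.join(ins.get(i, '') + word[i] for i in range(len(word))); i is always in range,
  -- so word[i] is ported with a default that is never used
  String.mk ((List.range cs.length).flatMap
    (fun (i : Nat) => ins.getD (i : Int) [] ++ [PySem.List.pyGetD cs (i : Int) ' ']))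

-- ===== PRECONDITION & SPEC =====
def Spec_replace_str_in_word (word : String) (out : String) : Prop := out = replace_str_in_word_alt word
instance (word : String) (out : String) : Decidable (Spec_replace_str_in_word word out) := by unfold Spec_replace_str_in_word; infer_instance

-- ===== CLAIM (what is proved, stated in full; the proofs are below) =====
def Claim_equal_replace_str_in_word : Prop := ∀ (word : String), Dom_replace_str_in_word word → Spec_replace_str_in_word word (replace_str_in_word word)

-- ===== LEMMAS AND PROOFS =====

-- the digit A's cascade inserts before index j, as prefix conditions on the suffix
def pvMatchD (s : List Char) : List Char :=
  if "one".toList <+: s then "1".toList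
  else if "two".toList <+: s then "2".toList
  else if "six".toList <+: s then "6".toList
  else if "zero".toList <+: s then "0".toList
  else if "four".toList <+: s then "4".toList
  else if "five".toList <+: s then "5".toList
  else if "nine".toList <+: s then "9".toList
  else if "three".toList <+: s then "3".toList
  else if "seven".toList <+: s then "7".toList
  else if "eight".toList <+: s then "8".toList
  else []

def pvWords : List (List Char) := pvTable.map Prod.fst

-- word[i:i+k] == w  is  'w is a prefix of the suffix at i'  (k = |w|)
lemma pvSlice_eq_iff (cs w : List Char) (i k : Nat) (hk : w.length = k) :
    PySem.List.slice cs (some (i:Int)) (some ((i:Int)+(k:Int))) = w ↔ w <+: cs.drop i := by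
  rw [PySem.List.slice_natCast_add, ← hk, List.prefix_iff_eq_take, eq_comm]

lemma pvS_one (cs : List Char) (i : Nat) :
    (PySem.List.slice cs (some (i:Int)) (some ((i:Int)+3)) = "one".toList) ↔ "one".toList <+: cs.drop i := by
  simpa using pvSlice_eq_iff cs "one".toList i 3 (by decide)
lemma pvS_two (cs : List Char) (i : Nat) :
    (PySem.List.slice cs (some (i:Int)) (some ((i:Int)+3)) = "two".toList) ↔ "two".toList <+: cs.drop i := by
  simpa using pvSlice_eq_iff cs "two".toList i 3 (by decide)
lemma pvS_six (cs : List Char) (i : Nat) :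
    (PySem.List.slice cs (some (i:Int)) (some ((i:Int)+3)) = "six".toList) ↔ "six".toList <+: cs.drop i := by
  simpa using pvSlice_eq_iff cs "six".toList i 3 (by decide)
lemma pvS_zero (cs : List Char) (i : Nat) :
    (PySem.List.slice cs (some (i:Int)) (some ((i:Int)+4)) = "zero".toList) ↔ "zero".toList <+: cs.drop i := by
  simpa using pvSlice_eq_iff cs "zero".toList i 4 (by decide)
lemma pvS_four (cs : List Char) (i : Nat) :
    (PySem.List.slice cs (some (i:Int)) (some ((i:Int)+4)) = "four".toList) ↔ "four".toList <+: cs.drop i := by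
  simpa using pvSlice_eq_iff cs "four".toList i 4 (by decide)
lemma pvS_five (cs : List Char) (i : Nat) :
    (PySem.List.slice cs (some (i:Int)) (some ((i:Int)+4)) = "five".toList) ↔ "five".toList <+: cs.drop i := by
  simpa using pvSlice_eq_iff cs "five".toList i 4 (by decide)
lemma pvS_nine (cs : List Char) (i : Nat) :
    (PySem.List.slice cs (some (i:Int)) (some ((i:Int)+4)) = "nine".toList) ↔ "nine".toList <+: cs.drop i := by
  simpa using pvSlice_eq_iff cs "nine".toList i 4 (by decide)
lemma pvS_three (cs : List Char) (i : Nat) :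
    (PySem.List.slice cs (some (i:Int)) (some ((i:Int)+5)) = "three".toList) ↔ "three".toList <+: cs.drop i := by
  simpa using pvSlice_eq_iff cs "three".toList i 5 (by decide)
lemma pvS_seven (cs : List Char) (i : Nat) :
    (PySem.List.slice cs (some (i:Int)) (some ((i:Int)+5)) = "seven".toList) ↔ "seven".toList <+: cs.drop i := by
  simpa using pvSlice_eq_iff cs "seven".toList i 5 (by decide)
lemma pvS_eight (cs : List Char) (i : Nat) :
    (PySem.List.slice cs (some (i:Int)) (some ((i:Int)+5)) = "eight".toList) ↔ "eight".toList <+: cs.drop i := by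
  simpa using pvSlice_eq_iff cs "eight".toList i 5 (by decide)

-- no spelled digit is a prefix of another, so at most one starts at a given index
lemma pvUnique (s : List Char) :
    ∀ w1 ∈ pvWords, ∀ w2 ∈ pvWords, w1 <+: s → w2 <+: s → w1 = w2 := by
  have key : ∀ w1 ∈ pvWords, ∀ w2 ∈ pvWords, w1 <+: w2 → w1 = w2 := by decide
  intro w1 h1 w2 h2 p1 p2
  rcases List.prefix_or_prefix_of_prefix p1 p2 with h | h
  · exact key w1 h1 w2 h2 h
  · exact (key w2 h2 w1 h1 h).symm

set_option maxHeartbeats 2000000 in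
lemma pvGoA_spec' (cs : List Char) : ∀ (n i : Nat) (acc : List Char), cs.length - i = n →
    replace_str_in_word_go cs i acc =
      acc ++ (List.range' i n).flatMap
        (fun j => pvMatchD (cs.drop j) ++ [cs.getD j ' ']) := by
  intro n
  induction n with
  | zero =>
    intro i acc hn
    rw [replace_str_in_word_go, dif_neg (by omega)]
    simp
  | succ n ih =>
    intro i acc hn
    have h : i < cs.length := by omega
    rw [replace_str_in_word_go, dif_pos h]
    rw [ih (i+1) _ (by omega), List.range'_succ, List.flatMap_cons]
    have hacc : (if PySem.List.slice cs (some (i:Int)) (some ((i:Int)+3)) = "one".toList then acc ++ "1".toList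
      else if PySem.List.slice cs (some (i:Int)) (some ((i:Int)+3)) = "two".toList then acc ++ "2".toList
      else if PySem.List.slice cs (some (i:Int)) (some ((i:Int)+3)) = "six".toList then acc ++ "6".toList
      else if PySem.List.slice cs (some (i:Int)) (some ((i:Int)+4)) = "zero".toList then acc ++ "0".toList
      else if PySem.List.slice cs (some (i:Int)) (some ((i:Int)+4)) = "four".toList then acc ++ "4".toList
      else if PySem.List.slice cs (some (i:Int)) (some ((i:Int)+4)) = "five".toList then acc ++ "5".toList
      else if PySem.List.slice cs (some (i:Int)) (some ((i:Int)+4)) = "nine".toList then acc ++ "9".toList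
      else if PySem.List.slice cs (some (i:Int)) (some ((i:Int)+5)) = "three".toList then acc ++ "3".toList
      else if PySem.List.slice cs (some (i:Int)) (some ((i:Int)+5)) = "seven".toList then acc ++ "7".toList
      else if PySem.List.slice cs (some (i:Int)) (some ((i:Int)+5)) = "eight".toList then acc ++ "8".toList
      else acc) = acc ++ pvMatchD (cs.drop i) := by
      simp only [pvS_one, pvS_two, pvS_six, pvS_zero, pvS_four, pvS_five, pvS_nine, pvS_three, pvS_seven, pvS_eight, pvMatchD]
      split_ifs <;> simp
    rw [hacc]
    have hget : cs[i] = cs.getD i ' ' := by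
      simp [List.getD_eq_getElem?_getD, List.getElem?_eq_getElem h]
    rw [hget]
    simp

lemma pvGoA_spec (cs : List Char) (i : Nat) (acc : List Char) :
    replace_str_in_word_go cs i acc =
      acc ++ (List.range' i (cs.length - i)).flatMap
        (fun j => pvMatchD (cs.drop j) ++ [cs.getD j ' ']) :=
  pvGoA_spec' cs (cs.length - i) i acc rfl

-- invariant of Source B's find loop: it adds key j ↦ d for exactly the j ≥ pos where w starts at j
lemma pvFindLoop_get (cs w d : List Char) (hw : w ≠ []) :
    ∀ fuel pos (ins : PySem.Dict Int (List Char)), pos ≤ cs.length →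
      cs.length + 1 - pos ≤ fuel → ∀ key : Int,
      (pvFindLoop fuel cs w d pos ins).get? key =
        if 0 ≤ key ∧ (pos:Int) ≤ key ∧ w <+: cs.drop key.toNat then some d
        else ins.get? key := by
  intro fuel
  induction fuel with
  | zero => intro pos ins hpos hfuel; omega
  | succ fuel ih =>
    intro pos ins hpos hfuel key
    rw [pvFindLoop]
    by_cases hj : PySem.Chars.findFrom cs w (pos : Int) none = -1
    · rw [if_pos hj]
      have hno : ¬ w <:+: cs.drop pos :=
        (PySem.Chars.findFrom_natCast_eq_neg_one_iff cs w pos hpos).mp hj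
      rw [if_neg]
      rintro ⟨hk0, hkpos, hpref⟩
      apply hno
      have hple : pos ≤ key.toNat := by omega
      have : cs.drop key.toNat = (cs.drop pos).drop (key.toNat - pos) := by
        rw [List.drop_drop]; congr 1; omega
      rw [this] at hpref
      exact hpref.isInfix.trans (List.drop_suffix _ _).isInfix
    · rw [if_neg hj]
      obtain ⟨hle, hpref, hmin⟩ := PySem.Chars.findFrom_natCast_spec cs w pos hpos hj
      set j := PySem.Chars.findFrom cs w (pos : Int) none with hjdef
      have hj0 : 0 ≤ j := le_trans (by exact_mod_cast Nat.cast_nonneg pos) hle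
      have hjlt : j.toNat < cs.length := by
        have h1 : w.length ≤ (cs.drop j.toNat).length := hpref.length_le
        have h2 : 0 < w.length := List.length_pos_of_ne_nil hw
        simp [List.length_drop] at h1
        omega
      rw [ih (j.toNat + 1) _ (by omega) (by omega) key]
      rw [PySem.Dict.get?_insert]
      by_cases hc : 0 ≤ key ∧ ((j.toNat + 1 : Nat) : Int) ≤ key ∧ w <+: cs.drop key.toNat
      · rw [if_pos hc, if_pos]
        refine ⟨hc.1, ?_, hc.2.2⟩
        have := hc.2.1
        push_cast at this ⊢
        omega
      · rw [if_neg hc]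
        by_cases hk : key = j
        · rw [if_pos hk, if_pos]
          subst hk
          refine ⟨hj0, hle, ?_⟩
          simpa using hpref
        · rw [if_neg hk, if_neg]
          rintro ⟨hk0, hkpos, hkpref⟩
          apply hc
          refine ⟨hk0, ?_, hkpref⟩
          by_contra hlt
          push_cast at hlt
          have hklt : key.toNat < j.toNat := by omega
          have : pos ≤ key.toNat := by omega
          exact hmin key.toNat this hklt hkpref

-- Source B's finished dict looked up at i is exactly A's cascade digit for the suffix at i
lemma pvDict_getD (cs : List Char) (i : Nat) :
    (pvTable.foldl (fun ins wd => pvFindLoop (cs.length + 1) cs wd.1 wd.2 0 ins)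
        PySem.Dict.empty).getD (i : Int) [] = pvMatchD (cs.drop i) := by
  simp only [pvTable, List.foldl_cons, List.foldl_nil]
  rw [PySem.Dict.getD_eq_get?_getD]
  rw [pvFindLoop_get cs "nine".toList "9".toList (by decide) (cs.length + 1) 0 _ (Nat.zero_le _) (by omega) (i : Int)]
  rw [pvFindLoop_get cs "eight".toList "8".toList (by decide) (cs.length + 1) 0 _ (Nat.zero_le _) (by omega) (i : Int)]
  rw [pvFindLoop_get cs "seven".toList "7".toList (by decide) (cs.length + 1) 0 _ (Nat.zero_le _) (by omega) (i : Int)]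
  rw [pvFindLoop_get cs "six".toList "6".toList (by decide) (cs.length + 1) 0 _ (Nat.zero_le _) (by omega) (i : Int)]
  rw [pvFindLoop_get cs "five".toList "5".toList (by decide) (cs.length + 1) 0 _ (Nat.zero_le _) (by omega) (i : Int)]
  rw [pvFindLoop_get cs "four".toList "4".toList (by decide) (cs.length + 1) 0 _ (Nat.zero_le _) (by omega) (i : Int)]
  rw [pvFindLoop_get cs "three".toList "3".toList (by decide) (cs.length + 1) 0 _ (Nat.zero_le _) (by omega) (i : Int)]
  rw [pvFindLoop_get cs "two".toList "2".toList (by decide) (cs.length + 1) 0 _ (Nat.zero_le _) (by omega) (i : Int)]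
  rw [pvFindLoop_get cs "one".toList "1".toList (by decide) (cs.length + 1) 0 _ (Nat.zero_le _) (by omega) (i : Int)]
  rw [pvFindLoop_get cs "zero".toList "0".toList (by decide) (cs.length + 1) 0 _ (Nat.zero_le _) (by omega) (i : Int)]
  rw [PySem.Dict.get?_empty]
  simp only [Nat.cast_zero, Int.natCast_nonneg, Int.toNat_natCast, true_and]
  by_cases hnine : "nine".toList <+: cs.drop i
  · have hno : ∀ v ∈ pvWords, v ≠ "nine".toList → ¬ v <+: cs.drop i :=
      fun v hv hne p => hne (pvUnique (cs.drop i) v hv "nine".toList (by decide) p hnine)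
    have none : ¬ "one".toList <+: cs.drop i := hno "one".toList (by decide) (by decide)
    have ntwo : ¬ "two".toList <+: cs.drop i := hno "two".toList (by decide) (by decide)
    have nsix : ¬ "six".toList <+: cs.drop i := hno "six".toList (by decide) (by decide)
    have nzero : ¬ "zero".toList <+: cs.drop i := hno "zero".toList (by decide) (by decide)
    have nfour : ¬ "four".toList <+: cs.drop i := hno "four".toList (by decide) (by decide)
    have nfive : ¬ "five".toList <+: cs.drop i := hno "five".toList (by decide) (by decide)
    rw [if_pos hnine, Option.getD_some, pvMatchD, if_neg none, if_neg ntwo, if_neg nsix, if_neg nzero, if_neg nfour, if_neg nfive, if_pos hnine]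
  · rw [if_neg hnine]
    by_cases height : "eight".toList <+: cs.drop i
    · have hno : ∀ v ∈ pvWords, v ≠ "eight".toList → ¬ v <+: cs.drop i :=
        fun v hv hne p => hne (pvUnique (cs.drop i) v hv "eight".toList (by decide) p height)
      have none : ¬ "one".toList <+: cs.drop i := hno "one".toList (by decide) (by decide)
      have ntwo : ¬ "two".toList <+: cs.drop i := hno "two".toList (by decide) (by decide)
      have nsix : ¬ "six".toList <+: cs.drop i := hno "six".toList (by decide) (by decide)
      have nzero : ¬ "zero".toList <+: cs.drop i := hno "zero".toList (by decide) (by decide)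
      have nfour : ¬ "four".toList <+: cs.drop i := hno "four".toList (by decide) (by decide)
      have nfive : ¬ "five".toList <+: cs.drop i := hno "five".toList (by decide) (by decide)
      have nnine : ¬ "nine".toList <+: cs.drop i := hno "nine".toList (by decide) (by decide)
      have nthree : ¬ "three".toList <+: cs.drop i := hno "three".toList (by decide) (by decide)
      have nseven : ¬ "seven".toList <+: cs.drop i := hno "seven".toList (by decide) (by decide)
      rw [if_pos height, Option.getD_some, pvMatchD, if_neg none, if_neg ntwo, if_neg nsix, if_neg nzero, if_neg nfour, if_neg nfive, if_neg nnine, if_neg nthree, if_neg nseven, if_pos height]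
    · rw [if_neg height]
      by_cases hseven : "seven".toList <+: cs.drop i
      · have hno : ∀ v ∈ pvWords, v ≠ "seven".toList → ¬ v <+: cs.drop i :=
          fun v hv hne p => hne (pvUnique (cs.drop i) v hv "seven".toList (by decide) p hseven)
        have none : ¬ "one".toList <+: cs.drop i := hno "one".toList (by decide) (by decide)
        have ntwo : ¬ "two".toList <+: cs.drop i := hno "two".toList (by decide) (by decide)
        have nsix : ¬ "six".toList <+: cs.drop i := hno "six".toList (by decide) (by decide)
        have nzero : ¬ "zero".toList <+: cs.drop i := hno "zero".toList (by decide) (by decide)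
        have nfour : ¬ "four".toList <+: cs.drop i := hno "four".toList (by decide) (by decide)
        have nfive : ¬ "five".toList <+: cs.drop i := hno "five".toList (by decide) (by decide)
        have nnine : ¬ "nine".toList <+: cs.drop i := hno "nine".toList (by decide) (by decide)
        have nthree : ¬ "three".toList <+: cs.drop i := hno "three".toList (by decide) (by decide)
        rw [if_pos hseven, Option.getD_some, pvMatchD, if_neg none, if_neg ntwo, if_neg nsix, if_neg nzero, if_neg nfour, if_neg nfive, if_neg nnine, if_neg nthree, if_pos hseven]
      · rw [if_neg hseven]
        by_cases hsix : "six".toList <+: cs.drop i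
        · have hno : ∀ v ∈ pvWords, v ≠ "six".toList → ¬ v <+: cs.drop i :=
            fun v hv hne p => hne (pvUnique (cs.drop i) v hv "six".toList (by decide) p hsix)
          have none : ¬ "one".toList <+: cs.drop i := hno "one".toList (by decide) (by decide)
          have ntwo : ¬ "two".toList <+: cs.drop i := hno "two".toList (by decide) (by decide)
          rw [if_pos hsix, Option.getD_some, pvMatchD, if_neg none, if_neg ntwo, if_pos hsix]
        · rw [if_neg hsix]
          by_cases hfive : "five".toList <+: cs.drop i
          · have hno : ∀ v ∈ pvWords, v ≠ "five".toList → ¬ v <+: cs.drop i :=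
              fun v hv hne p => hne (pvUnique (cs.drop i) v hv "five".toList (by decide) p hfive)
            have none : ¬ "one".toList <+: cs.drop i := hno "one".toList (by decide) (by decide)
            have ntwo : ¬ "two".toList <+: cs.drop i := hno "two".toList (by decide) (by decide)
            have nsix : ¬ "six".toList <+: cs.drop i := hno "six".toList (by decide) (by decide)
            have nzero : ¬ "zero".toList <+: cs.drop i := hno "zero".toList (by decide) (by decide)
            have nfour : ¬ "four".toList <+: cs.drop i := hno "four".toList (by decide) (by decide)
            rw [if_pos hfive, Option.getD_some, pvMatchD, if_neg none, if_neg ntwo, if_neg nsix, if_neg nzero, if_neg nfour, if_pos hfive]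
          · rw [if_neg hfive]
            by_cases hfour : "four".toList <+: cs.drop i
            · have hno : ∀ v ∈ pvWords, v ≠ "four".toList → ¬ v <+: cs.drop i :=
                fun v hv hne p => hne (pvUnique (cs.drop i) v hv "four".toList (by decide) p hfour)
              have none : ¬ "one".toList <+: cs.drop i := hno "one".toList (by decide) (by decide)
              have ntwo : ¬ "two".toList <+: cs.drop i := hno "two".toList (by decide) (by decide)
              have nsix : ¬ "six".toList <+: cs.drop i := hno "six".toList (by decide) (by decide)
              have nzero : ¬ "zero".toList <+: cs.drop i := hno "zero".toList (by decide) (by decide)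
              rw [if_pos hfour, Option.getD_some, pvMatchD, if_neg none, if_neg ntwo, if_neg nsix, if_neg nzero, if_pos hfour]
            · rw [if_neg hfour]
              by_cases hthree : "three".toList <+: cs.drop i
              · have hno : ∀ v ∈ pvWords, v ≠ "three".toList → ¬ v <+: cs.drop i :=
                  fun v hv hne p => hne (pvUnique (cs.drop i) v hv "three".toList (by decide) p hthree)
                have none : ¬ "one".toList <+: cs.drop i := hno "one".toList (by decide) (by decide)
                have ntwo : ¬ "two".toList <+: cs.drop i := hno "two".toList (by decide) (by decide)
                have nsix : ¬ "six".toList <+: cs.drop i := hno "six".toList (by decide) (by decide)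
                have nzero : ¬ "zero".toList <+: cs.drop i := hno "zero".toList (by decide) (by decide)
                have nfour : ¬ "four".toList <+: cs.drop i := hno "four".toList (by decide) (by decide)
                have nfive : ¬ "five".toList <+: cs.drop i := hno "five".toList (by decide) (by decide)
                have nnine : ¬ "nine".toList <+: cs.drop i := hno "nine".toList (by decide) (by decide)
                rw [if_pos hthree, Option.getD_some, pvMatchD, if_neg none, if_neg ntwo, if_neg nsix, if_neg nzero, if_neg nfour, if_neg nfive, if_neg nnine, if_pos hthree]
              · rw [if_neg hthree]
                by_cases htwo : "two".toList <+: cs.drop i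
                · have hno : ∀ v ∈ pvWords, v ≠ "two".toList → ¬ v <+: cs.drop i :=
                    fun v hv hne p => hne (pvUnique (cs.drop i) v hv "two".toList (by decide) p htwo)
                  have none : ¬ "one".toList <+: cs.drop i := hno "one".toList (by decide) (by decide)
                  rw [if_pos htwo, Option.getD_some, pvMatchD, if_neg none, if_pos htwo]
                · rw [if_neg htwo]
                  by_cases hone : "one".toList <+: cs.drop i
                  · have hno : ∀ v ∈ pvWords, v ≠ "one".toList → ¬ v <+: cs.drop i :=
                      fun v hv hne p => hne (pvUnique (cs.drop i) v hv "one".toList (by decide) p hone)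
                    rw [if_pos hone, Option.getD_some, pvMatchD, if_pos hone]
                  · rw [if_neg hone]
                    by_cases hzero : "zero".toList <+: cs.drop i
                    · have hno : ∀ v ∈ pvWords, v ≠ "zero".toList → ¬ v <+: cs.drop i :=
                        fun v hv hne p => hne (pvUnique (cs.drop i) v hv "zero".toList (by decide) p hzero)
                      have none : ¬ "one".toList <+: cs.drop i := hno "one".toList (by decide) (by decide)
                      have ntwo : ¬ "two".toList <+: cs.drop i := hno "two".toList (by decide) (by decide)
                      have nsix : ¬ "six".toList <+: cs.drop i := hno "six".toList (by decide) (by decide)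
                      rw [if_pos hzero, Option.getD_some, pvMatchD, if_neg none, if_neg ntwo, if_neg nsix, if_pos hzero]
                    · rw [if_neg hzero]
                      rw [Option.getD_none, pvMatchD]
                      rw [if_neg hone, if_neg htwo, if_neg hsix, if_neg hzero, if_neg hfour, if_neg hfive, if_neg hnine, if_neg hthree, if_neg hseven, if_neg height]

-- ===== VERDICT (by name: the statement is the Claim_ definition above) =====
theorem replace_str_in_word_spec : Claim_equal_replace_str_in_word := by
  intro word _
  unfold Spec_replace_str_in_word replace_str_in_word replace_str_in_word_alt
  rw [pvGoA_spec]
  simp only [Nat.sub_zero, ← List.range_eq_range', List.nil_append]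
  congr 1
  rw [List.flatMap_def, List.flatMap_def]
  congr 1
  apply List.map_congr_left
  intro i hi
  rw [pvDict_getD]
  simp [PySem.List.pyGetD_natCast]
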